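-- pv_equiv track=rewrite | github.com/mahdihosseini/CONet | CONet/adaptive_graph.py | adaptive_stop
-- ===== SOURCE A (Python) =====
-- def adaptive_stop(x_data,y_data,threshold_min,epoch_wait):
--     '''From the wth epoch, If there is an increase of x in any of the next y epochs, keep going.
--     If not, make the value at the wth epoch the max'''
--     ranks=[0.1,0.2,0.3,0.4,0.5]
--     condition=False
--     for i in range(0,len(x_data)-epoch_wait,1):
--         condition=False
--         for j in range(i+1,epoch_wait+i+1,1):
--             if ((y_data[j]-y_data[i])>threshold_min):
--                 condition=True
--                 break
--         if condition==False:
--             return i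
--         '''if condition==True:
--             #final_vals=[(i,y_data[i]) for i in x_data[-epoch_wait:]]
--             #final_vals=final_vals.sort(key=lambda tup: tup[1])
--             #return final_vals[-1][0]
--             return len(x_data)-1'''
--     return len(x_data)-1
-- ===== SOURCE B (Python) =====
-- def adaptive_stop(x_data, y_data, threshold_min, epoch_wait):
--     """Sliding-window maximum with a monotonic deque: return the first epoch i
--     whose following window of epoch_wait epochs holds no value above
--     y_data[i] + threshold_min; otherwise len(x_data) - 1."""
--     n = len(x_data)
--     limit = n - epoch_wait
--     if epoch_wait <= 0:
--         # empty look-ahead window: the very first epoch already fails to improve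
--         return 0 if limit > 0 else n - 1
--     dq = []   # indices j of window candidates, y-values strictly decreasing
--     nxt = 1   # next index to feed into the deque
--     for i in range(limit):
--         if dq and dq[0] <= i:     # drop the index that left the window
--             dq.pop(0)
--         while nxt <= i + epoch_wait:   # feed indices up to the window's right edge
--             while dq and y_data[dq[-1]] <= y_data[nxt]:
--                 dq.pop()
--             dq.append(nxt)
--             nxt += 1
--         if y_data[dq[0]] - y_data[i] <= threshold_min:
--             return i
--     return n - 1
-- ===== Notes on version B (the rewrite author's own statement) =====
-- stated objective: alternative
-- what changed: A rescans the whole epoch_wait look-ahead window for every epoch; B makes one left-to-right pass maintaining a monotonic deque of window indices, so each epoch is compared against the precomputed window maximum and every index enters/leaves the deque at most once.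
-- outside the precondition, e.g. on adaptive_stop([2, 9, 1, 7, 0, 6], [-1, -2, 4, -5536, 10], 1, 2): A returns 5, B raises IndexError; on adaptive_stop([0, 0, 0], [0, 0], 0, 1): A returns 0, B returns 0
import Mathlib
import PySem

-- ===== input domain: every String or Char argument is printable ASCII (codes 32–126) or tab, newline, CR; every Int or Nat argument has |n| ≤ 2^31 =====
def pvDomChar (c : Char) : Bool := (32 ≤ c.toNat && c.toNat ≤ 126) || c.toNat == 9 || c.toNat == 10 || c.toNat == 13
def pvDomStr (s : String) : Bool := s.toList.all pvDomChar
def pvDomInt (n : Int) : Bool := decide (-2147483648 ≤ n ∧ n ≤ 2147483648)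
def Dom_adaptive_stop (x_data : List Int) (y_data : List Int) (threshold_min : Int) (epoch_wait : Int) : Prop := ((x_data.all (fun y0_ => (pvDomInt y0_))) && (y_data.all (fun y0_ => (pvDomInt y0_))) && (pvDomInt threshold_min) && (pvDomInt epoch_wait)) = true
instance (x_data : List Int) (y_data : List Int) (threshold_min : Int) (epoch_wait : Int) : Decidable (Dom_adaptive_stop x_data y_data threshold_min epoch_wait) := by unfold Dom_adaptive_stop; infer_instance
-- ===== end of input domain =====

-- B replaces A's rescan of each look-ahead window by a single monotonic-deque sliding-window
-- maximum pass (objective: alternative algorithm; return values proved equal on Pre_).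

-- ===== PORT A =====
-- y_data[idx] for the (here always nonnegative) indices A uses; the default 0 is unreachable
-- under Pre_adaptive_stop (every index accessed is then in range).
def pvGetA (y : List Int) (idx : Int) : Int := PySem.List.pyGetD y idx 0

-- inner 'for j in range(i+1, epoch_wait+i+1, 1)' with its early break; fuel is the exact trip
-- count (stop - j).toNat of the step-1 range (the range list itself may be astronomically long
-- for negative epoch_wait, so it is not materialised)
def pvAInner (y : List Int) (t i : Int) (fuel : Nat) (j stop : Int) : Bool :=
  match fuel with
  | 0 => false
  | f + 1 =>
    if j < stop then
      if pvGetA y j - pvGetA y i > t then true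
      else pvAInner y t i f (j + 1) stop
    else false

-- outer 'for i in range(0, len(x_data)-epoch_wait, 1)' with its early return; fuel is the
-- exact remaining trip count (n - ew - i).toNat
def pvALoop (y : List Int) (t ew n : Int) (fuel : Nat) (i : Int) : Int :=
  match fuel with
  | 0 => n - 1
  | f + 1 =>
    if i < n - ew then
      if pvAInner y t i ew.toNat (i + 1) (ew + i + 1) = false then i
      else pvALoop y t ew n f (i + 1)
    else n - 1

def adaptive_stop (x_data : List Int) (y_data : List Int) (threshold_min : Int) (epoch_wait : Int) : Int :=
  pvALoop y_data threshold_min epoch_wait ((x_data.length : Int))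
    (((x_data.length : Int) - epoch_wait).toNat) 0

-- ===== PORT B =====
def pvGetB (y : List Int) (k : Nat) : Int := PySem.List.pyGetD y (k : Int) 0

-- Source B's deque is a Python list with front at position 0; here it is stored NEWEST-FIRST, so
-- Python's dq[-1] / dq.pop() / dq.append(x) are head operations and dq[0] is getLast.
-- 'while dq and y_data[dq[-1]] <= y_data[nxt]: dq.pop()' then 'dq.append(nxt)':
def pvPush (y : List Int) (x : Nat) (dq : List Nat) : List Nat :=
  x :: dq.dropWhile (fun k => pvGetB y k ≤ pvGetB y x)

-- 'while nxt <= i + epoch_wait: …'; fuel is the exact trip count stop + 1 - nxt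
def pvRefill (y : List Int) (fuel : Nat) (dq : List Nat) (nxt stop : Nat) : List Nat × Nat :=
  match fuel with
  | 0 => (dq, nxt)
  | f + 1 =>
    if nxt ≤ stop then pvRefill y f (pvPush y nxt dq) (nxt + 1) stop
    else (dq, nxt)

-- the 'for i in range(limit)' loop, fuel = limit - i; 'if dq and dq[0] <= i: dq.pop(0)' is the
-- getLast test (the default i+1 just makes the empty deque fail the test, like Python's 'dq and')
def pvBLoop (y : List Int) (t : Int) (ew limit : Nat) (n : Int) (fuel i : Nat) (dq : List Nat) (nxt : Nat) : Int :=
  match fuel with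
  | 0 => n - 1
  | f + 1 =>
    if i < limit then
      let dq1 := if dq.getLast?.getD (i + 1) ≤ i then dq.dropLast else dq
      let s := pvRefill y (i + ew + 1 - nxt) dq1 nxt (i + ew)
      if pvGetB y (s.1.getLast?.getD 0) - pvGetB y i ≤ t then (i : Int)
      else pvBLoop y t ew limit n f (i + 1) s.1 s.2
    else n - 1

def adaptive_stop_alt (x_data : List Int) (y_data : List Int) (threshold_min : Int) (epoch_wait : Int) : Int :=
  let n : Int := (x_data.length : Int)
  let limit : Int := n - epoch_wait
  if epoch_wait ≤ 0 then (if 0 < limit then 0 else n - 1)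
  else pvBLoop y_data threshold_min epoch_wait.toNat limit.toNat n limit.toNat 0 [] 1

-- ===== PRECONDITION & SPEC =====
-- Pre_ excludes short-y inputs (0 < epoch_wait < len(x_data) with len(y_data) < len(x_data)):
-- there A's indexing y_data[j] generally raises IndexError; on some of them A still returns
-- through its early exit before reaching an out-of-range index, so Pre_ is (stated here and
-- cited in claim.json) slightly narrower than A's exact returning set.
def Pre_adaptive_stop (x_data : List Int) (y_data : List Int) (threshold_min : Int) (epoch_wait : Int) : Prop :=
  epoch_wait ≤ 0 ∨ (x_data.length : Int) ≤ epoch_wait ∨ x_data.length ≤ y_data.length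
instance (x_data : List Int) (y_data : List Int) (threshold_min : Int) (epoch_wait : Int) : Decidable (Pre_adaptive_stop x_data y_data threshold_min epoch_wait) := by unfold Pre_adaptive_stop; infer_instance

def pvWitness_adaptive_stop : List Int × List Int × Int × Int := ([0, 1, 2, 3], [5, 6, 4, 1], 0, 2)

def Spec_adaptive_stop (x_data : List Int) (y_data : List Int) (threshold_min : Int) (epoch_wait : Int) (out : Int) : Prop := out = adaptive_stop_alt x_data y_data threshold_min epoch_wait
instance (x_data : List Int) (y_data : List Int) (threshold_min : Int) (epoch_wait : Int) (out : Int) : Decidable (Spec_adaptive_stop x_data y_data threshold_min epoch_wait out) := by unfold Spec_adaptive_stop; infer_instance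

-- ===== CLAIM (what is proved, stated in full; the proofs are below) =====
def Claim_equal_adaptive_stop : Prop := ∀ (x_data : List Int) (y_data : List Int) (threshold_min : Int) (epoch_wait : Int), Dom_adaptive_stop x_data y_data threshold_min epoch_wait → Pre_adaptive_stop x_data y_data threshold_min epoch_wait → Spec_adaptive_stop x_data y_data threshold_min epoch_wait (adaptive_stop x_data y_data threshold_min epoch_wait)

-- ===== LEMMAS AND PROOFS =====

-- deque invariant: indices strictly decreasing (newest first), their y-values strictly
-- increasing towards the front, all indices in [lo, hi], and every j in [lo, hi] is
-- dominated by some deque index at least as large with at least as large a y-value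
def DqGood (y : List Int) (lo hi : Nat) (dq : List Nat) : Prop :=
  dq.Pairwise (fun a b => b < a) ∧
  dq.Pairwise (fun a b => pvGetB y a < pvGetB y b) ∧
  (∀ k ∈ dq, lo ≤ k ∧ k ≤ hi) ∧
  (∀ j : Nat, lo ≤ j → j ≤ hi → ∃ k ∈ dq, j ≤ k ∧ pvGetB y j ≤ pvGetB y k)

theorem pairwise_last_rel {α : Type} {R : α → α → Prop} :
    ∀ (l : List α) (L : α), l.Pairwise R → l.getLast? = some L → ∀ k ∈ l, k = L ∨ R k L := by
  intro l
  induction l with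
  | nil => intro L _ h; simp at h
  | cons a l ih =>
    intro L hp hL k hk
    cases l with
    | nil =>
      simp at hL hk
      subst hL; subst hk; left; rfl
    | cons b m =>
      rw [List.getLast?_cons_cons] at hL
      rcases List.mem_cons.mp hk with rfl | hk'
      · exact Or.inr (List.rel_of_pairwise_cons hp (List.mem_of_getLast? hL))
      · exact ih L hp.of_cons hL k hk'

theorem mem_dropWhile_yv (y : List Int) (x : Nat) :
    ∀ (l : List Nat), l.Pairwise (fun a b => pvGetB y a < pvGetB y b) →
    ∀ b ∈ l.dropWhile (fun k => pvGetB y k ≤ pvGetB y x), pvGetB y x < pvGetB y b := by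
  intro l
  induction l with
  | nil => intro _ b hb; simp at hb
  | cons a l ih =>
    intro hp b hb
    by_cases ha : pvGetB y a ≤ pvGetB y x
    · rw [List.dropWhile_cons_of_pos (by simpa using ha)] at hb
      exact ih hp.of_cons b hb
    · rw [List.dropWhile_cons_of_neg (by simpa using ha)] at hb
      rcases List.mem_cons.mp hb with rfl | hb'
      · omega
      · have := List.rel_of_pairwise_cons hp hb'
        omega

theorem push_good (y : List Int) (lo hi : Nat) (dq : List Nat)
    (h : DqGood y lo hi dq) (hlo : lo ≤ hi + 1) :
    DqGood y lo (hi + 1) (pvPush y (hi + 1) dq) := by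
  obtain ⟨h1, h2, h3, h4⟩ := h
  have hsub : (dq.dropWhile (fun k => pvGetB y k ≤ pvGetB y (hi + 1))).Sublist dq :=
    List.dropWhile_sublist _
  refine ⟨?_, ?_, ?_, ?_⟩
  · refine List.pairwise_cons.mpr ⟨?_, h1.sublist hsub⟩
    intro b hb
    have := (h3 b (hsub.subset hb)).2
    omega
  · refine List.pairwise_cons.mpr ⟨?_, h2.sublist hsub⟩
    intro b hb
    exact mem_dropWhile_yv y (hi + 1) dq h2 b hb
  · intro k hk
    rcases List.mem_cons.mp hk with rfl | hk'
    · omega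
    · have := h3 k (hsub.subset hk')
      omega
  · intro j hj1 hj2
    by_cases hje : j = hi + 1
    · subst hje
      exact ⟨hi + 1, List.mem_cons_self .., le_refl _, le_refl _⟩
    · obtain ⟨k, hk, hjk, hyk⟩ := h4 j hj1 (by omega)
      rw [← List.takeWhile_append_dropWhile
        (p := fun k => decide (pvGetB y k ≤ pvGetB y (hi + 1))) (l := dq)] at hk
      rcases List.mem_append.mp hk with htk | hdk
      · have hky : pvGetB y k ≤ pvGetB y (hi + 1) := by
          have := List.mem_takeWhile_imp htk
          simpa using this
        exact ⟨hi + 1, List.mem_cons_self .., by omega, by omega⟩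
      · exact ⟨k, List.mem_cons_of_mem _ hdk, hjk, hyk⟩

theorem pop_good (y : List Int) (i hi : Nat) (dq : List Nat) (h : DqGood y i hi dq) :
    DqGood y (i + 1) hi (if dq.getLast?.getD (i + 1) ≤ i then dq.dropLast else dq) := by
  obtain ⟨h1, h2, h3, h4⟩ := h
  cases hdq : dq.getLast? with
  | none =>
    have hnil : dq = [] := List.getLast?_eq_none_iff.mp hdq
    subst hnil
    rw [if_neg (by simp)]
    refine ⟨List.Pairwise.nil, List.Pairwise.nil, by simp, ?_⟩
    intro j hj1 hj2
    obtain ⟨k, hk, _⟩ := h4 j (by omega) hj2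
    simp at hk
  | some L =>
    have hne : dq ≠ [] := by
      intro hh; subst hh; simp at hdq
    have hLmem : L ∈ dq := List.mem_of_getLast? hdq
    have hLlo := (h3 L hLmem).1
    have hLmin := pairwise_last_rel dq L h1 hdq
    have hgl : dq.getLast hne = L := by
      have := List.getLast?_eq_getLast hne
      rw [hdq] at this
      exact (Option.some_inj.mp this).symm
    have hsplit : dq.dropLast ++ [L] = dq := by
      rw [← hgl]; exact List.dropLast_append_getLast hne
    simp only [Option.getD_some]
    by_cases hc : L ≤ i
    · rw [if_pos hc]
      have hsubl : dq.dropLast.Sublist dq := List.dropLast_sublist dq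
      have hpa : ∀ a ∈ dq.dropLast, L < a := by
        intro a ha
        have hp' : (dq.dropLast ++ [L]).Pairwise (fun a b => b < a) := by
          rw [hsplit]; exact h1
        exact (List.pairwise_append.mp hp').2.2 a ha L (by simp)
      refine ⟨h1.sublist hsubl, h2.sublist hsubl, ?_, ?_⟩
      · intro k hk
        have hb := h3 k (hsubl.subset hk)
        have := hpa k hk
        omega
      · intro j hj1 hj2
        obtain ⟨k, hk, hjk, hyk⟩ := h4 j (by omega) hj2
        rw [← hsplit] at hk
        rcases List.mem_append.mp hk with hk' | hk'
        · exact ⟨k, hk', hjk, hyk⟩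
        · simp at hk'
          omega
    · rw [if_neg hc]
      refine ⟨h1, h2, ?_, ?_⟩
      · intro k hk
        have hb := h3 k hk
        rcases hLmin k hk with rfl | hlt
        · omega
        · omega
      · intro j hj1 hj2
        exact h4 j (by omega) hj2

theorem front_max (y : List Int) (lo hi : Nat) (dq : List Nat)
    (h : DqGood y lo hi dq) (hle : lo ≤ hi) :
    ∃ L, dq.getLast? = some L ∧ lo ≤ L ∧ L ≤ hi ∧
      ∀ j : Nat, lo ≤ j → j ≤ hi → pvGetB y j ≤ pvGetB y L := by
  obtain ⟨h1, h2, h3, h4⟩ := h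
  obtain ⟨k0, hk0, _, _⟩ := h4 lo (le_refl _) hle
  have hne : dq ≠ [] := by
    intro hh; subst hh; simp at hk0
  obtain ⟨L, hL⟩ : ∃ L, dq.getLast? = some L := by
    cases hh : dq.getLast? with
    | none => exact absurd (List.getLast?_eq_none_iff.mp hh) hne
    | some L => exact ⟨L, rfl⟩
  have hLmem : L ∈ dq := List.mem_of_getLast? hL
  refine ⟨L, hL, (h3 L hLmem).1, (h3 L hLmem).2, ?_⟩
  intro j hj1 hj2
  obtain ⟨k, hk, hjk, hyk⟩ := h4 j hj1 hj2
  rcases pairwise_last_rel dq L h2 hL k hk with rfl | hlt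
  · exact hyk
  · omega

theorem aInner_iff (y : List Int) (t iv : Int) :
    ∀ (fuel : Nat) (j stop : Int), fuel = (stop - j).toNat →
    (pvAInner y t iv fuel j stop = true ↔
      ∃ k : Int, j ≤ k ∧ k < stop ∧ pvGetA y k - pvGetA y iv > t) := by
  intro fuel
  induction fuel with
  | zero =>
    intro j stop hf
    simp only [pvAInner]
    constructor
    · intro h; simp at h
    · rintro ⟨k, h1, h2, _⟩; omega
  | succ m ih =>
    intro j stop hf
    simp only [pvAInner]
    by_cases hj : j < stop
    · rw [if_pos hj]
      by_cases hy : pvGetA y j - pvGetA y iv > t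
      · rw [if_pos hy]
        exact ⟨fun _ => ⟨j, le_refl _, hj, hy⟩, fun _ => rfl⟩
      · rw [if_neg hy, ih (j + 1) stop (by omega)]
        constructor
        · rintro ⟨k, h1, h2, h3⟩
          exact ⟨k, by omega, h2, h3⟩
        · rintro ⟨k, h1, h2, h3⟩
          rcases eq_or_lt_of_le h1 with rfl | hlt
          · exact absurd h3 hy
          · exact ⟨k, by omega, h2, h3⟩
    · rw [if_neg hj]
      constructor
      · intro h; simp at h
      · rintro ⟨k, h1, h2, _⟩; omega

theorem aInner_nat_iff (y : List Int) (t : Int) (i ew : Nat) :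
    (pvAInner y t (i : Int) ((ew : Int)).toNat ((i : Int) + 1) ((ew : Int) + i + 1) = true ↔
      ∃ k : Nat, i + 1 ≤ k ∧ k ≤ i + ew ∧ pvGetB y k - pvGetB y i > t) := by
  rw [aInner_iff y t (i : Int) ((ew : Int)).toNat ((i : Int) + 1) ((ew : Int) + i + 1) (by omega)]
  constructor
  · rintro ⟨k, h1, h2, h3⟩
    refine ⟨k.toNat, by omega, by omega, ?_⟩
    have hk : ((k.toNat : Nat) : Int) = k := by omega
    show pvGetA y ((k.toNat : Nat) : Int) - pvGetA y ((i : Nat) : Int) > t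
    rw [hk]
    exact h3
  · rintro ⟨k, h1, h2, h3⟩
    refine ⟨(k : Int), by omega, by omega, ?_⟩
    exact h3

theorem refill_good (y : List Int) (lo : Nat) :
    ∀ (fuel hi stop : Nat) (dq : List Nat), fuel = stop + 1 - (hi + 1) →
    lo ≤ hi + 1 → DqGood y lo hi dq →
    DqGood y lo (max hi stop) (pvRefill y fuel dq (hi + 1) stop).1 ∧
      (pvRefill y fuel dq (hi + 1) stop).2 = max (hi + 1) (stop + 1) := by
  intro fuel
  induction fuel with
  | zero =>
    intro hi stop dq hf hlo hg
    simp only [pvRefill]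
    constructor
    · have : max hi stop = hi := by omega
      rw [this]; exact hg
    · omega
  | succ m ih =>
    intro hi stop dq hf hlo hg
    simp only [pvRefill]
    by_cases h : hi + 1 ≤ stop
    · rw [if_pos h]
      have hrec := ih (hi + 1) stop (pvPush y (hi + 1) dq) (by omega) (by omega)
        (push_good y lo hi dq hg hlo)
      constructor
      · have hmax : max (hi + 1) stop = max hi stop := by omega
        rw [← hmax]; exact hrec.1
      · rw [hrec.2]; omega
    · rw [if_neg h]
      constructor
      · have : max hi stop = hi := by omega
        rw [this]; exact hg
      · omega

theorem loop_eq (y : List Int) (t : Int) (ew : Nat) (hew : 1 ≤ ew) (n : Int) :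
    ∀ (fuel i : Nat) (dq : List Nat),
    fuel = (n - ew).toNat - i → 1 ≤ i → DqGood y i (i + ew - 1) dq →
    pvBLoop y t ew (n - ew).toNat n fuel i dq (i + ew) = pvALoop y t ew n fuel i := by
  intro fuel
  induction fuel with
  | zero =>
    intro i dq hf h1i hg
    simp only [pvBLoop, pvALoop]
  | succ m ih =>
    intro i dq hf h1i hg
    have hi : i < (n - (ew : Int)).toNat := by omega
    have hpop := pop_good y i (i + ew - 1) dq hg
    have hr := refill_good y (i + 1) (i + ew + 1 - (i + ew)) (i + ew - 1)
      (i + ew) (if dq.getLast?.getD (i + 1) ≤ i then dq.dropLast else dq) (by omega)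
      (by omega) hpop
    have he : i + ew - 1 + 1 = i + ew := by omega
    rw [he] at hr
    have hmax1 : max (i + ew - 1) (i + ew) = i + ew := by omega
    have hmax2 : max (i + ew) (i + ew + 1) = i + ew + 1 := by omega
    rw [hmax1, hmax2] at hr
    obtain ⟨hgood2, hs2⟩ := hr
    obtain ⟨L, hL, hL1, hL2, hLmax⟩ := front_max y (i + 1) (i + ew) _ hgood2 (by omega)
    simp only [pvBLoop, pvALoop]
    rw [if_pos hi, if_pos (show (i : Int) < n - (ew : Int) by omega)]
    by_cases hcond : ∃ k : Nat, i + 1 ≤ k ∧ k ≤ i + ew ∧ pvGetB y k - pvGetB y i > t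
    · have hA : pvAInner y t (i : Int) ((ew : Int)).toNat ((i : Int) + 1)
          ((ew : Int) + (i : Int) + 1) = true :=
        (aInner_nat_iff y t i ew).mpr hcond
      obtain ⟨k, hk1, hk2, hk3⟩ := hcond
      have hBcheck : ¬ (pvGetB y ((pvRefill y (i + ew + 1 - (i + ew))
          (if dq.getLast?.getD (i + 1) ≤ i then dq.dropLast else dq) (i + ew)
          (i + ew)).1.getLast?.getD 0) - pvGetB y i ≤ t) := by
        rw [hL]
        simp only [Option.getD_some]
        have := hLmax k hk1 hk2
        omega
      rw [if_neg hBcheck,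
        if_neg (show ¬ (pvAInner y t (i : Int) ((ew : Int)).toNat ((i : Int) + 1)
          ((ew : Int) + (i : Int) + 1) = false) from by rw [hA]; decide)]
      rw [hs2]
      have he2 : i + ew + 1 = (i + 1) + ew := by omega
      have he3 : (i + 1) + ew - 1 = i + ew := by omega
      rw [he2]
      rw [show (i + 1 + ew - (i + ew) : Nat) = i + ew + 1 - (i + ew) from by omega]
      have hrec := ih (i + 1) (pvRefill y (i + ew + 1 - (i + ew))
        (if dq.getLast?.getD (i + 1) ≤ i then dq.dropLast else dq) (i + ew) (i + ew)).1
        (by omega) (by omega) (by rw [he3]; exact hgood2)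
      rw [hrec]
      push_cast
      rfl
    · have hA : pvAInner y t (i : Int) ((ew : Int)).toNat ((i : Int) + 1)
          ((ew : Int) + (i : Int) + 1) = false := by
        cases h : pvAInner y t (i : Int) ((ew : Int)).toNat ((i : Int) + 1)
            ((ew : Int) + (i : Int) + 1) with
        | false => rfl
        | true => exact absurd ((aInner_nat_iff y t i ew).mp h) hcond
      have hBcheck : pvGetB y ((pvRefill y (i + ew + 1 - (i + ew))
          (if dq.getLast?.getD (i + 1) ≤ i then dq.dropLast else dq) (i + ew)
          (i + ew)).1.getLast?.getD 0) - pvGetB y i ≤ t := by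
        rw [hL]
        simp only [Option.getD_some]
        by_contra hcon
        exact hcond ⟨L, hL1, hL2, by omega⟩
      rw [if_pos hBcheck, if_pos hA]

theorem main_eq (y : List Int) (t : Int) (ew : Nat) (hew : 1 ≤ ew) (n : Int) :
    pvBLoop y t ew (n - ew).toNat n (n - ew).toNat 0 [] 1 = pvALoop y t ew n (n - ew).toNat 0 := by
  by_cases hlim : 0 < (n - (ew : Int)).toNat
  · obtain ⟨m, hm⟩ : ∃ m, (n - (ew : Int)).toNat = m + 1 := ⟨(n - (ew : Int)).toNat - 1, by omega⟩
    have hg0 : DqGood y 1 0 ([] : List Nat) := by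
      refine ⟨List.Pairwise.nil, List.Pairwise.nil, by simp, ?_⟩
      intro j hj1 hj2
      omega
    have hr := refill_good y 1 (0 + ew + 1 - 1) 0 (0 + ew) ([] : List Nat) (by omega)
      (by omega) hg0
    have hmax1 : max 0 (0 + ew) = 0 + ew := by omega
    have hmax2 : max (0 + 1) (0 + ew + 1) = 0 + ew + 1 := by omega
    rw [hmax1, hmax2] at hr
    obtain ⟨hgood2, hs2⟩ := hr
    obtain ⟨L, hL, hL1, hL2, hLmax⟩ := front_max y 1 (0 + ew) _ hgood2 (by omega)
    rw [show (0 + 1 : Nat) = 1 from rfl] at *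
    rw [hm]
    simp only [pvBLoop, pvALoop]
    rw [if_pos (show 0 < m + 1 by omega),
      if_pos (show (0 : Int) < n - (ew : Int) by omega)]
    rw [show (if ([] : List Nat).getLast?.getD (0 + 1) ≤ 0 then ([] : List Nat).dropLast
        else ([] : List Nat)) = ([] : List Nat) from by simp]
    have hshape : pvAInner y t 0 ((ew : Int)).toNat (0 + 1) ((ew : Int) + 0 + 1)
        = pvAInner y t ((0 : Nat) : Int) ((ew : Int)).toNat (((0 : Nat) : Int) + 1)
          ((ew : Int) + ((0 : Nat) : Int) + 1) := by
      norm_num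
    by_cases hcond : ∃ k : Nat, 0 + 1 ≤ k ∧ k ≤ 0 + ew ∧ pvGetB y k - pvGetB y 0 > t
    · have hA : pvAInner y t 0 ((ew : Int)).toNat (0 + 1) ((ew : Int) + 0 + 1) = true := by
        rw [hshape]
        exact (aInner_nat_iff y t 0 ew).mpr hcond
      obtain ⟨k, hk1, hk2, hk3⟩ := hcond
      have hBcheck : ¬ (pvGetB y ((pvRefill y (0 + ew + 1 - 1) [] 1 (0 + ew)).1.getLast?.getD 0)
          - pvGetB y 0 ≤ t) := by
        rw [hL]
        simp only [Option.getD_some]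
        have := hLmax k (by omega) (by omega)
        omega
      rw [if_neg hBcheck,
        if_neg (show ¬ (pvAInner y t 0 ((ew : Int)).toNat (0 + 1) ((ew : Int) + 0 + 1) = false)
          from by rw [hA]; decide)]
      rw [hs2]
      have hrec := loop_eq y t ew hew n m 1
        (pvRefill y (0 + ew + 1 - 1) [] 1 (0 + ew)).1 (by omega) (le_refl _)
        (by
          have h13 : 1 + ew - 1 = 0 + ew := by omega
          rw [h13]
          exact hgood2)
      rw [show (0 + ew + 1 : Nat) = 1 + ew from by omega]
      rw [show (1 + ew - 1 : Nat) = 0 + ew + 1 - 1 from by omega]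
      rw [hm] at hrec
      rw [show (0 + 1 : Nat) = 1 from rfl, hrec]
      norm_num
    · have hA : pvAInner y t 0 ((ew : Int)).toNat (0 + 1) ((ew : Int) + 0 + 1) = false := by
        cases h : pvAInner y t 0 ((ew : Int)).toNat (0 + 1) ((ew : Int) + 0 + 1) with
        | false => rfl
        | true =>
          rw [hshape] at h
          exact absurd ((aInner_nat_iff y t 0 ew).mp h) hcond
      have hBcheck : pvGetB y ((pvRefill y (0 + ew + 1 - 1) [] 1 (0 + ew)).1.getLast?.getD 0)
          - pvGetB y 0 ≤ t := by
        rw [hL]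
        simp only [Option.getD_some]
        by_contra hcon
        exact hcond ⟨L, by omega, by omega, by omega⟩
      rw [if_pos hBcheck, if_pos hA]
      norm_num
  · have h0 : (n - (ew : Int)).toNat = 0 := by omega
    rw [h0]
    simp only [pvBLoop, pvALoop]

-- ===== VERDICT (by name: the statement is the Claim_ definition above) =====
theorem adaptive_stop_spec : Claim_equal_adaptive_stop := by
  unfold Claim_equal_adaptive_stop
  intro x_data y_data threshold_min epoch_wait _ _
  unfold Spec_adaptive_stop adaptive_stop adaptive_stop_alt
  by_cases hew : epoch_wait ≤ 0
  · rw [if_pos hew]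
    by_cases hn : 0 < (x_data.length : Int) - epoch_wait
    · rw [if_pos hn]
      obtain ⟨m, hm⟩ : ∃ m, ((x_data.length : Int) - epoch_wait).toNat = m + 1 :=
        ⟨((x_data.length : Int) - epoch_wait).toNat - 1, by omega⟩
      have hz : epoch_wait.toNat = 0 := by omega
      rw [hm]
      simp only [pvALoop]
      rw [if_pos (show (0 : Int) < (x_data.length : Int) - epoch_wait from hn), hz]
      simp only [pvAInner]
      simp
    · have h0 : ((x_data.length : Int) - epoch_wait).toNat = 0 := by omega
      rw [if_neg hn, h0]
      simp only [pvALoop]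
  · rw [if_neg hew]
    have h1 : (1 : Nat) ≤ epoch_wait.toNat := by omega
    have hcast : ((epoch_wait.toNat : Nat) : Int) = epoch_wait := by omega
    have hme := main_eq y_data threshold_min epoch_wait.toNat h1 (x_data.length : Int)
    rw [hcast] at hme
    exact hme.symm
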